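-- pv_equiv track=rewrite | github.com/Bugmita-Bora/AI-Adaptive-Onboarding-Engine | ai_engine/skill_graph.py | get_all_prerequisites
-- ===== SOURCE A (Python) =====
-- def get_all_prerequisites(skill, graph, visited=None):
--     """
--     Recursively find ALL prerequisites for a skill
--     including prerequisites of prerequisites
--     """
--     if visited is None:
--         visited = set()
--
--     prerequisites = []
--
--     for prereq in graph.get(skill, []):
--         if prereq not in visited:
--             visited.add(prereq)
--             # Recursively get prereqs of prereqs
--             deeper = get_all_prerequisites(prereq, graph, visited)
--             prerequisites.extend(deeper)
--             prerequisites.append(prereq)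
--
--     return prerequisites
-- ===== SOURCE B (Python) =====
-- def get_all_prerequisites(skill, graph, visited=None):
--     """Iterative DFS with an explicit stack (post-order), instead of recursion."""
--     if visited is None:
--         visited = set()
--     result = []
--     stack = [(skill, iter(graph.get(skill, [])))]
--     while stack:
--         node, it = stack[-1]
--         pushed = False
--         for n in it:
--             if n not in visited:
--                 visited.add(n)
--                 stack.append((n, iter(graph.get(n, []))))
--                 pushed = True
--                 break
--         if not pushed:
--             stack.pop()
--             if stack:
--                 result.append(node)
--     return result
-- ===== Notes on version B (the rewrite author's own statement) =====
-- stated objective: alternative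
-- what changed: Replaced the recursive DFS (recursion per neighbour with list extend) by an iterative DFS over an explicit stack of (node, neighbour-iterator) frames that appends each node at pop time, preserving the lazy visited checks, the unmarked root and the exact post-order output.
import Mathlib
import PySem

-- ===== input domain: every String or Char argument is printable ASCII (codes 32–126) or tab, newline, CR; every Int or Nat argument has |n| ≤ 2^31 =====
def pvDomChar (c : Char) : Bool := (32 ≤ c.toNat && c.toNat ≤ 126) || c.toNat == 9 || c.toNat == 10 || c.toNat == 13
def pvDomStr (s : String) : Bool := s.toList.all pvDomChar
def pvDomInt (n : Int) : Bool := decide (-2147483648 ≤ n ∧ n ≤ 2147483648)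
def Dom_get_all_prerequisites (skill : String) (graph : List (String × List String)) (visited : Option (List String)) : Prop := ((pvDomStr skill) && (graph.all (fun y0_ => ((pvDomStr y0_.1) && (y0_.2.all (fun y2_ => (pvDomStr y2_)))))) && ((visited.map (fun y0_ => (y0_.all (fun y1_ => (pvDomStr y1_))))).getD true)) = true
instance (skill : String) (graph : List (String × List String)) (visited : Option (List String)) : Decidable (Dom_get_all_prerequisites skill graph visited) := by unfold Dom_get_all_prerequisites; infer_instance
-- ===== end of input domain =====

-- B replaces A's recursive DFS by an iterative explicit-stack DFS (same post-order output);
-- equivalence is about the RETURN value only: the Python versions also mutate a caller-supplied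
-- `visited` set in place (both in the same way), which is not modelled here.

-- ===== PORT A =====
-- graph.get(k, []) — first-match association-list lookup (exact Python dict semantics via PySem.Dict)
def nbrsOf (graph : List (String × List String)) (k : String) : List String :=
  PySem.Dict.getD ⟨graph⟩ k []

-- A's loop `for prereq in ...` with the recursion inlined at the recursive call site;
-- the Nat argument is pure termination fuel (initial fuel graph.length provably never runs out).
def loopA (graph : List (String × List String)) :
    Nat → List String → PySem.Set String → (List String × PySem.Set String)
  | _, [], v => ([], v)
  | f, p :: rest, v =>
    if PySem.Set.contains v p then loopA graph f rest v
    else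
      let v1 := PySem.Set.add v p
      let dv2 : List String × PySem.Set String :=
        match nbrsOf graph p, f with
        | [], _ => ([], v1)            -- recursion over an empty adjacency list returns at once
        | _ :: _, 0 => ([], v1)        -- fuel guard, unreachable when fuel >= ukCount
        | ms, f' + 1 => loopA graph f' ms v1
      let res2 := loopA graph f rest dv2.2
      (dv2.1 ++ p :: res2.1, res2.2)
  termination_by f ns _ => (f, ns.length)

def get_all_prerequisites (skill : String) (graph : List (String × List String))
    (visited : Option (List String)) : List String :=
  let v0 : PySem.Set String :=
    match visited with
    | none => PySem.Set.empty
    | some l => PySem.Set.ofList l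
  (loopA graph graph.length (nbrsOf graph skill) v0).1

-- ===== PORT B =====
-- Source B's while-loop over the explicit stack of (node, remaining-neighbour-list) frames;
-- one equation per machine step: pop (append node unless the stack empties, i.e. the root),
-- skip a visited neighbour, push an unvisited one.  Nat argument = termination fuel as above.
def runB (graph : List (String × List String)) :
    Nat → List (String × List String) → PySem.Set String → List String → List String
  | _, [], _, acc => acc
  | f, (_, []) :: [], _, acc => acc                              -- root frame exhausted: done
  | f, (node, []) :: fr :: tail, v, acc =>
      runB graph f (fr :: tail) v (acc ++ [node])                -- pop: post-order append
  | f, (node, n :: rest) :: tail, v, acc =>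
      if PySem.Set.contains v n then
        runB graph f ((node, rest) :: tail) v acc                -- lazy visited check: skip
      else
        match nbrsOf graph n, f with
        | [], f => runB graph f ((n, ([] : List String)) :: (node, rest) :: tail)
                     (PySem.Set.add v n) acc                     -- push a leaf frame
        | _ :: _, 0 => runB graph 0 ((node, rest) :: tail)
                     (PySem.Set.add v n) (acc ++ [n])            -- fuel guard, unreachable
        | ms, f' + 1 => runB graph f' ((n, ms) :: (node, rest) :: tail)
                     (PySem.Set.add v n) acc                     -- push
  termination_by f st _ _ => (f, (st.map (fun fr => 2 * fr.2.length)).sum + st.length)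

def get_all_prerequisites_alt (skill : String) (graph : List (String × List String))
    (visited : Option (List String)) : List String :=
  let v0 : PySem.Set String :=
    match visited with
    | none => PySem.Set.empty
    | some l => PySem.Set.ofList l
  runB graph graph.length [(skill, nbrsOf graph skill)] v0 []

-- ===== PRECONDITION & SPEC =====
def Spec_get_all_prerequisites (skill : String) (graph : List (String × List String)) (visited : Option (List String)) (out : List String) : Prop := out = get_all_prerequisites_alt skill graph visited
instance (skill : String) (graph : List (String × List String)) (visited : Option (List String)) (out : List String) : Decidable (Spec_get_all_prerequisites skill graph visited out) := by unfold Spec_get_all_prerequisites; infer_instance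

-- ===== CLAIM (what is proved, stated in full; the proofs are below) =====
def Claim_equal_get_all_prerequisites : Prop := ∀ (skill : String) (graph : List (String × List String)) (visited : Option (List String)), Dom_get_all_prerequisites skill graph visited → Spec_get_all_prerequisites skill graph visited (get_all_prerequisites skill graph visited)

-- ===== LEMMAS AND PROOFS =====

-- count of keys of `graph` with a non-empty adjacency list not yet in `v`
-- (used only as a termination fuel bound; the ports' fuel guard branches are unreachable)
def ukCount (graph : List (String × List String)) (v : PySem.Set String) : Nat :=
  ((graph.map Prod.fst).filter
    (fun k => !(nbrsOf graph k).isEmpty && !PySem.Set.contains v k)).length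

lemma filter_len_mono {α : Type} (L : List α) (P Q : α → Bool)
    (h : ∀ a ∈ L, P a = true → Q a = true) :
    (L.filter P).length ≤ (L.filter Q).length := by
  induction L with
  | nil => simp
  | cons a L ih =>
    have ih' := ih (fun a ha => h a (List.mem_cons_of_mem _ ha))
    by_cases hP : P a = true
    · have hQ := h a (List.mem_cons_self) hP
      simp [hP, hQ]; omega
    · have hP' : P a = false := by revert hP; cases P a <;> simp
      cases hQ : Q a <;> simp [hP', hQ] <;> omega

lemma filter_len_strict {α : Type} (L : List α) (P Q : α → Bool)
    (h : ∀ a ∈ L, P a = true → Q a = true)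
    (b : α) (hb : b ∈ L) (hbP : P b = false) (hbQ : Q b = true) :
    (L.filter P).length < (L.filter Q).length := by
  induction L with
  | nil => simp at hb
  | cons a L ih =>
    have hmono := filter_len_mono L P Q (fun a ha => h a (List.mem_cons_of_mem _ ha))
    rcases List.mem_cons.1 hb with rfl | hb'
    · simp [hbP, hbQ]; omega
    · have ih' := ih (fun a ha => h a (List.mem_cons_of_mem _ ha)) hb'
      by_cases hP : P a = true
      · have hQ := h a (List.mem_cons_self) hP
        simp [hP, hQ]; omega
      · have hP' : P a = false := by revert hP; cases P a <;> simp
        cases hQ : Q a <;> simp [hP', hQ] <;> omega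

lemma contains_add_of (v : PySem.Set String) (p k : String)
    (h : PySem.Set.contains v k = true) :
    PySem.Set.contains (PySem.Set.add v p) k = true := by
  simp [PySem.Set.contains, PySem.Set.add] at *
  split <;> simp [h]

lemma contains_add_self (v : PySem.Set String) (p : String) :
    PySem.Set.contains (PySem.Set.add v p) p = true := by
  simp [PySem.Set.contains, PySem.Set.add]
  split <;> simp_all

lemma contains_add_ne (v : PySem.Set String) (p k : String) (h : k ≠ p) :
    PySem.Set.contains (PySem.Set.add v p) k = PySem.Set.contains v k := by
  simp [PySem.Set.contains, PySem.Set.add]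
  split <;> simp [h]

lemma ukCount_add_le (graph : List (String × List String)) (v : PySem.Set String) (p : String) :
    ukCount graph (PySem.Set.add v p) ≤ ukCount graph v := by
  unfold ukCount
  apply filter_len_mono
  intro a _ hP
  simp only [Bool.and_eq_true, Bool.not_eq_true'] at hP ⊢
  refine ⟨hP.1, ?_⟩
  cases hc : PySem.Set.contains v a
  · rfl
  · have := contains_add_of v p a hc
    simp_all

lemma mem_keys_of_nbrs_ne (graph : List (String × List String)) (p : String)
    (hm : nbrsOf graph p ≠ []) : p ∈ graph.map Prod.fst := by
  by_contra hmem
  have hc : (PySem.Dict.mk graph).contains p = false := by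
    rw [PySem.Dict.contains_mk]
    simp only [List.any_eq_false]
    intro q hq hbeq
    exact hmem (List.mem_map.2 ⟨q, hq, by simpa using hbeq⟩)
  exact hm (PySem.Dict.getD_of_not_contains _ _ hc)

lemma ukCount_add_lt (graph : List (String × List String)) (v : PySem.Set String) (p : String)
    (hm : nbrsOf graph p ≠ []) (hv : PySem.Set.contains v p = false) :
    ukCount graph (PySem.Set.add v p) < ukCount graph v := by
  unfold ukCount
  refine filter_len_strict _ _ _ ?_ p (mem_keys_of_nbrs_ne graph p hm) ?_ ?_
  · intro a _ hP
    simp only [Bool.and_eq_true, Bool.not_eq_true'] at hP ⊢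
    refine ⟨hP.1, ?_⟩
    cases hc : PySem.Set.contains v a
    · rfl
    · have := contains_add_of v p a hc
      simp_all
  · simp [contains_add_self]
  · simp only [Bool.and_eq_true, Bool.not_eq_true']
    exact ⟨by simp [hm], hv⟩

lemma ukCount_add_empty (graph : List (String × List String)) (v : PySem.Set String) (p : String)
    (hm : nbrsOf graph p = []) :
    ukCount graph (PySem.Set.add v p) = ukCount graph v := by
  unfold ukCount
  congr 1
  apply List.filter_congr
  intro a _
  by_cases hne : (nbrsOf graph a).isEmpty
  · simp [hne]
  · have hap : a ≠ p := by rintro rfl; simp [hm] at hne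
    rw [contains_add_ne v p a hap]

lemma ukCount_le_len (graph : List (String × List String)) (v : PySem.Set String) :
    ukCount graph v ≤ graph.length := by
  unfold ukCount
  have h := List.length_filter_le
    (fun k => !(nbrsOf graph k).isEmpty && !PySem.Set.contains v k) (graph.map Prod.fst)
  simpa using h

lemma loopA_uk_le (graph : List (String × List String)) :
    ∀ (f : Nat) (ns : List String) (v : PySem.Set String),
      ukCount graph (loopA graph f ns v).2 ≤ ukCount graph v := by
  intro f
  induction f using Nat.strong_induction_on with
  | _ f IHf =>
  intro ns
  induction ns with
  | nil => intro v; simp [loopA]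
  | cons p rest IHns =>
    intro v
    rw [loopA]
    cases hc : PySem.Set.contains v p with
    | true => simpa [hc] using IHns v
    | false =>
      simp only [hc, Bool.false_eq_true, if_false]
      have hle : ∀ w, ukCount graph (loopA graph f rest w).2 ≤ ukCount graph w := IHns
      cases f with
      | zero =>
        rcases hnb : nbrsOf graph p with _ | ⟨m, ms⟩ <;>
          · simp only [hnb]
            exact le_trans (hle _) (ukCount_add_le graph v p)
      | succ f' =>
        rcases hnb : nbrsOf graph p with _ | ⟨m, ms⟩
        · simp only [hnb]
          exact le_trans (hle _) (ukCount_add_le graph v p)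
        · simp only [hnb]
          calc ukCount graph (loopA graph (f' + 1) rest
                  (loopA graph f' (m :: ms) (PySem.Set.add v p)).2).2
              ≤ ukCount graph (loopA graph f' (m :: ms) (PySem.Set.add v p)).2 := hle _
            _ ≤ ukCount graph (PySem.Set.add v p) := IHf f' (by omega) _ _
            _ ≤ _ := ukCount_add_le graph v p

lemma ukCount_pos (graph : List (String × List String)) (v : PySem.Set String) (p : String)
    (hm : nbrsOf graph p ≠ []) (hv : PySem.Set.contains v p = false) :
    1 ≤ ukCount graph v := by
  have := ukCount_add_lt graph v p hm hv
  omega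

-- measure of a stack, for the manual induction over runB's recursion
def stMeas (st : List (String × List String)) : Nat :=
  (st.map (fun fr => 2 * fr.2.length)).sum + st.length

lemma runB_fuel_irrel (graph : List (String × List String)) :
    ∀ (f g : Nat) (st : List (String × List String)) (v : PySem.Set String) (acc : List String),
      ukCount graph v ≤ f → ukCount graph v ≤ g →
      runB graph f st v acc = runB graph g st v acc := by
  intro f
  induction f using Nat.strong_induction_on with
  | _ f IHf =>
  suffices H : ∀ (m : Nat) (st : List (String × List String)) (v : PySem.Set String)
      (acc : List String) (g : Nat), stMeas st ≤ m → ukCount graph v ≤ f → ukCount graph v ≤ g →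
      runB graph f st v acc = runB graph g st v acc by
    intro g st v acc hf hg; exact H (stMeas st) st v acc g le_rfl hf hg
  intro m
  induction m with
  | zero =>
    intro st v acc g hm _ _
    cases st with
    | nil => rw [runB.eq_def]; conv_rhs => rw [runB.eq_def]
    | cons fr tail => exfalso; simp [stMeas] at hm
  | succ m IHm =>
    intro st v acc g hm hf hg
    cases st with
    | nil => rw [runB.eq_def]; conv_rhs => rw [runB.eq_def]
    | cons fr tail =>
      obtain ⟨node, ns⟩ := fr
      cases ns with
      | nil =>
        cases tail with
        | nil => rw [runB.eq_def]; conv_rhs => rw [runB.eq_def]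
        | cons fr' tail' =>
          obtain ⟨n2, ns2⟩ := fr'
          rw [runB.eq_def]; conv_rhs => rw [runB.eq_def]
          dsimp only
          exact IHm ((n2, ns2) :: tail') v (acc ++ [node]) g
            (by simp [stMeas] at hm ⊢; omega) hf hg
      | cons n rest =>
        rw [runB.eq_def]; conv_rhs => rw [runB.eq_def]
        dsimp only
        cases hc : PySem.Set.contains v n with
        | true =>
          simp only [hc, if_true]
          exact IHm ((node, rest) :: tail) v acc g
            (by simp [stMeas] at hm ⊢; omega) hf hg
        | false =>
          simp only [hc, Bool.false_eq_true, if_false]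
          rcases hnb : nbrsOf graph n with _ | ⟨w, ws⟩
          · -- leaf push: fuel untouched, measure drops by 1
            simp only [hnb]
            exact IHm ((n, ([] : List String)) :: (node, rest) :: tail)
              (PySem.Set.add v n) acc g
              (by simp [stMeas] at hm ⊢; omega)
              (le_trans (ukCount_add_le graph v n) hf)
              (le_trans (ukCount_add_le graph v n) hg)
          · -- a real push: both fuels are positive (ukCount ≥ 1)
            have h1 : 1 ≤ ukCount graph v :=
              ukCount_pos graph v n (by simp [hnb]) hc
            cases f with
            | zero => omega
            | succ f' =>
              cases g with
              | zero => omega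
              | succ g' =>
                simp only [hnb]
                have hlt := ukCount_add_lt graph v n (by simp [hnb]) hc
                exact IHf f' (by omega) g'
                  ((n, w :: ws) :: (node, rest) :: tail) (PySem.Set.add v n) acc
                  (by omega) (by omega)

-- Main lemma: running B's machine from a frame (node, ns) on top simulates A's loop on ns;
-- at the pop the node is appended unless it is the bottom (root) frame.
lemma bridge (graph : List (String × List String)) :
    ∀ (g : Nat) (ns : List String) (v : PySem.Set String)
      (f : Nat) (node : String) (tail : List (String × List String)) (acc : List String),
      ukCount graph v ≤ f → ukCount graph v ≤ g →
      runB graph f ((node, ns) :: tail) v acc =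
        (match tail with
         | [] => acc ++ (loopA graph g ns v).1
         | _ :: _ =>
             runB graph f tail (loopA graph g ns v).2
               (acc ++ (loopA graph g ns v).1 ++ [node])) := by
  intro g
  induction g using Nat.strong_induction_on with
  | _ g IHg =>
  intro ns
  induction ns with
  | nil =>
    intro v f node tail acc _ _
    cases tail with
    | nil => rw [runB.eq_def]; simp [loopA]
    | cons fr' tail' =>
      obtain ⟨n2, ns2⟩ := fr'
      rw [runB.eq_def]; dsimp only
      simp [loopA]
  | cons p rest IHns =>
    intro v f node tail acc hf hg
    rw [runB.eq_def]; dsimp only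
    conv_rhs => rw [loopA]
    cases hc : PySem.Set.contains v p with
    | true =>
      simp only [hc, if_true]
      exact IHns v f node tail acc hf hg
    | false =>
      simp only [hc, Bool.false_eq_true, if_false]
      rcases hnb : nbrsOf graph p with _ | ⟨w, ws⟩
      · -- leaf neighbour: B pushes an empty frame which pops immediately, appending p;
        -- A's recursive call returns immediately.
        simp only [hnb]
        rw [runB.eq_def]; dsimp only
        have hv1f : ukCount graph (PySem.Set.add v p) ≤ f :=
          le_trans (by rw [ukCount_add_empty graph v p hnb]) hf
        have hv1g : ukCount graph (PySem.Set.add v p) ≤ g :=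
          le_trans (by rw [ukCount_add_empty graph v p hnb]) hg
        have h := IHns (PySem.Set.add v p) f node tail (acc ++ [p]) hv1f hv1g
        rw [h]
        cases f with
        | zero =>
          cases tail <;> simp
        | succ f' =>
          cases tail <;> simp
      · -- real neighbour: B pushes a frame for it, A recurses into it
        have h1 : 1 ≤ ukCount graph v :=
          ukCount_pos graph v p (by simp [hnb]) hc
        cases f with
        | zero => omega
        | succ f' =>
          cases g with
          | zero => omega
          | succ g' =>
            simp only [hnb]
            have hlt := ukCount_add_lt graph v p (by simp [hnb]) hc
            -- inner IH: process the pushed frame (p, w :: ws)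
            have hin := IHg g' (by omega) (w :: ws) (PySem.Set.add v p) f' p
              ((node, rest) :: tail) acc (by omega) (by omega)
            rw [hin]
            dsimp only
            -- outer IH: continue with the rest of node's neighbours
            set v2 := (loopA graph g' (w :: ws) (PySem.Set.add v p)).2 with hv2
            have hv2le : ukCount graph v2 ≤ ukCount graph (PySem.Set.add v p) :=
              loopA_uk_le graph g' (w :: ws) (PySem.Set.add v p)
            have hout := IHns v2 f' node tail
              (acc ++ (loopA graph g' (w :: ws) (PySem.Set.add v p)).1 ++ [p])
              (by omega) (by omega)
            rw [hout]
            cases tail with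
            | nil => simp
            | cons fr' tail' =>
              dsimp only
              -- fuel patch: f' on the left vs f' + 1 on the right; both suffice
              have hm3 : ukCount graph (loopA graph (g' + 1) rest v2).2 ≤ f' := by
                have := loopA_uk_le graph (g' + 1) rest v2; omega
              rw [runB_fuel_irrel graph f' (f' + 1) (fr' :: tail')
                    ((loopA graph (g' + 1) rest v2).2) _ hm3 (hm3.trans (Nat.le_succ f'))]
              congr 1
              simp

-- ===== VERDICT (by name: the statement is the Claim_ definition above) =====
theorem get_all_prerequisites_spec : Claim_equal_get_all_prerequisites := by
  intro skill graph visited _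
  unfold Spec_get_all_prerequisites get_all_prerequisites get_all_prerequisites_alt
  cases visited with
  | none =>
    have h := bridge graph graph.length (nbrsOf graph skill) PySem.Set.empty
      graph.length skill [] [] (ukCount_le_len _ _) (ukCount_le_len _ _)
    simpa using h.symm
  | some l =>
    have h := bridge graph graph.length (nbrsOf graph skill) (PySem.Set.ofList l)
      graph.length skill [] [] (ukCount_le_len _ _) (ukCount_le_len _ _)
    simpa using h.symm
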